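-- pv_equiv track=rewrite | github.com/K0UR05H/advent-of-code-2025 | d02p1.py | next_invalid_id
-- ===== SOURCE A (Python) =====
-- def next_invalid_id(n: int):
--     ns = str(n)
--     if len(ns) % 2 == 0:
--         a, b = int(ns[: len(ns) // 2]), int(ns[len(ns) // 2 :])
--         if b < a:
--             return int(2 * str(a))
--         elif a == b:
--             return n
--         else:
--             return next_invalid_id(int(str(a + 1) + len(str(b)) * "0"))
--     else:
--         return int(2 * ("1" + (len(ns) // 2) * "0"))
-- ===== SOURCE B (Python) =====
-- def _double(s):
--     return int(s + s)
--
--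
-- def _step(n):
--     """One round of the search: returns (next_candidate, None) or (None, answer)."""
--     ns = str(n)
--     h = len(ns) // 2
--     if len(ns) % 2 == 1:
--         return None, _double("1" + "0" * h)
--     a, b = int(ns[:h]), int(ns[h:])
--     if a == b:
--         return None, n
--     if b < a:
--         return None, _double(str(a))
--     return int(str(a + 1) + "0" * len(str(b))), None
--
--
-- def next_invalid_id(n: int):
--     while True:
--         nxt, res = _step(n)
--         if nxt is None:
--             return res
--         n = nxt
-- ===== Notes on version B (the rewrite author's own statement) =====
-- stated objective: alternative
-- what changed: A's self-recursion is re-decomposed into an explicit step function that returns either the answer or the next candidate, driven by an iterative while-loop with a shared string-doubling helper, so the transformed number is carried as loop state instead of on the call stack.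
-- outside the precondition, e.g. on next_invalid_id(-9): A raises ValueError, B raises ValueError; on next_invalid_id(-1): A raises ValueError, B raises ValueError
import Mathlib
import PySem

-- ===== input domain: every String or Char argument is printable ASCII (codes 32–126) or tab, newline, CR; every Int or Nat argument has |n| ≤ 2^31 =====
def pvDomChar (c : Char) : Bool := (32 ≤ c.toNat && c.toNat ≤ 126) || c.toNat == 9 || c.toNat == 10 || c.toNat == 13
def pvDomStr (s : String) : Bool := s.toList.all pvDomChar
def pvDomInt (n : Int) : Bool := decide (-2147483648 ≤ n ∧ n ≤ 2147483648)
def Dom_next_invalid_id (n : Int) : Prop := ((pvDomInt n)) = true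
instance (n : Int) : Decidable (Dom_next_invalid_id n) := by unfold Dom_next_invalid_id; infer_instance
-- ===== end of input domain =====

-- B re-organises A's self-recursion into an explicit step function driven by a while-loop
-- (same per-round work, no Python recursion); objective: alternative decomposition, not speed.

-- ===== PORT A =====
-- Literal port of A's recursion; the `fuel` argument is only a totality guard (the Python
-- recursion terminates on every int it accepts; within the stated domain the depth is ≤ 6,
-- far below 64, so the 0-fuel branch is never reached on admitted inputs).
-- `len(ns) // 2` and `len(ns) % 2` act on a nonnegative length, so Nat `/`/`%` are exact;
-- string slices `ns[:h]`/`ns[h:]` are PySem.List.slice on the character list;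
-- `int(...)` is PySem.Int.ofChars?; `.getD 0` only totalises the ValueError case, which
-- Pre_next_invalid_id excludes.
def next_invalid_id_rec : Nat → Int → Int
  | 0, _ => 0
  | fuel + 1, n =>
    let ns := PySem.Int.toChars n
    if ns.length % 2 = 0 then
      -- a, b = int(ns[: len(ns) // 2]), int(ns[len(ns) // 2 :])
      let a := (PySem.Int.ofChars? (PySem.List.slice ns none (some ((ns.length / 2 : Nat) : Int)))).getD 0
      let b := (PySem.Int.ofChars? (PySem.List.slice ns (some ((ns.length / 2 : Nat) : Int)) none)).getD 0
      if b < a then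
        -- int(2 * str(a))
        (PySem.Int.ofChars? (PySem.Int.toChars a ++ PySem.Int.toChars a)).getD 0
      else if a = b then n
      else
        -- next_invalid_id(int(str(a + 1) + len(str(b)) * "0"))
        next_invalid_id_rec fuel
          ((PySem.Int.ofChars? (PySem.Int.toChars (a + 1) ++
              List.replicate (PySem.Int.toChars b).length '0')).getD 0)
    else
      -- int(2 * ("1" + (len(ns) // 2) * "0"))
      (PySem.Int.ofChars? (('1' :: List.replicate (ns.length / 2) '0') ++
          ('1' :: List.replicate (ns.length / 2) '0'))).getD 0

def next_invalid_id (n : Int) : Int := next_invalid_id_rec 64 n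

-- ===== PORT B =====
-- Literal port of Source B: `_double`, the step function `_step` (answer in the second slot,
-- next candidate in the first) and the `while True:` driver, fuelled like A's port.
def pyDoubleB (s : List Char) : Int := (PySem.Int.ofChars? (s ++ s)).getD 0

def next_invalid_id_stepB (n : Int) : Option Int × Option Int :=
  let ns := PySem.Int.toChars n
  let h := ns.length / 2
  if ns.length % 2 = 1 then
    (none, some (pyDoubleB ('1' :: List.replicate h '0')))
  else
    let a := (PySem.Int.ofChars? (PySem.List.slice ns none (some (h : Int)))).getD 0
    let b := (PySem.Int.ofChars? (PySem.List.slice ns (some (h : Int)) none)).getD 0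
    if a = b then (none, some n)
    else if b < a then (none, some (pyDoubleB (PySem.Int.toChars a)))
    else
      (some ((PySem.Int.ofChars? (PySem.Int.toChars (a + 1) ++
          List.replicate (PySem.Int.toChars b).length '0')).getD 0), none)

def next_invalid_id_loopB : Nat → Int → Int
  | 0, _ => 0
  | fuel + 1, n =>
    match next_invalid_id_stepB n with
    | (some nxt, _) => next_invalid_id_loopB fuel nxt
    | (none, res) => res.getD 0

def next_invalid_id_alt (n : Int) : Int := next_invalid_id_loopB 64 n

-- ===== PRECONDITION & SPEC =====
-- Pre_ excludes exactly -9 ≤ n ≤ -1: there str(n) is "-d", the first half is "-", and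
-- A raises ValueError on int("-") (B raises the same way).
def Pre_next_invalid_id (n : Int) : Prop := n < -9 ∨ 0 ≤ n
instance (n : Int) : Decidable (Pre_next_invalid_id n) := by unfold Pre_next_invalid_id; infer_instance

def pvWitness_next_invalid_id : Int := 1234

def Spec_next_invalid_id (n : Int) (out : Int) : Prop := out = next_invalid_id_alt n
instance (n : Int) (out : Int) : Decidable (Spec_next_invalid_id n out) := by unfold Spec_next_invalid_id; infer_instance

-- ===== CLAIM (what is proved, stated in full; the proofs are below) =====
def Claim_equal_next_invalid_id : Prop := ∀ (n : Int), Dom_next_invalid_id n → Pre_next_invalid_id n → Spec_next_invalid_id n (next_invalid_id n)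

-- ===== LEMMAS AND PROOFS =====

-- The two ports run the same round-for-round computation: A's recursion with fuel f equals
-- B's step-driven loop with fuel f, for every starting value (the proof is a fuel induction
-- plus a case analysis on the parity test and the three-way comparison of the halves).
theorem next_invalid_id_rec_eq_loopB (fuel : Nat) :
    ∀ (n : Int), next_invalid_id_rec fuel n = next_invalid_id_loopB fuel n := by
  induction fuel with
  | zero => intro n; rfl
  | succ f ih =>
    intro n
    simp only [next_invalid_id_rec, next_invalid_id_loopB, next_invalid_id_stepB, pyDoubleB]
    rcases Nat.even_or_odd (PySem.Int.toChars n).length with hpar | hpar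
    · have h0 : (PySem.Int.toChars n).length % 2 = 0 := Nat.even_iff.mp hpar
      have h1 : ¬ (PySem.Int.toChars n).length % 2 = 1 := by omega
      simp only [h0, reduceIte]
      set a := (PySem.Int.ofChars? (PySem.List.slice (PySem.Int.toChars n) none
        (some (((PySem.Int.toChars n).length / 2 : Nat) : Int)))).getD 0 with ha
      set b := (PySem.Int.ofChars? (PySem.List.slice (PySem.Int.toChars n)
        (some (((PySem.Int.toChars n).length / 2 : Nat) : Int)) none)).getD 0 with hb
      by_cases hba : b < a
      · have hne : ¬ a = b := by omega
        simp [hba, hne]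
      · by_cases heq : a = b
        · simp [heq]
        · simp only [hba, heq, if_false]
          exact ih _
    · have h1 : (PySem.Int.toChars n).length % 2 = 1 := Nat.odd_iff.mp hpar
      have h0 : ¬ (PySem.Int.toChars n).length % 2 = 0 := by omega
      simp [h1]

-- ===== VERDICT (by name: the statement is the Claim_ definition above) =====
theorem next_invalid_id_spec : Claim_equal_next_invalid_id := by
  intro n _ _
  unfold Spec_next_invalid_id next_invalid_id next_invalid_id_alt
  exact next_invalid_id_rec_eq_loopB 64 n
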